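-- pv_equiv track=rewrite | github.com/hemanth1403/CS6120-NLP-Project-Contract-Question-Answering | BiLSTM/cuad_dataloader.py | _find_token_positions
-- ===== SOURCE A (Python) =====
-- from typing import List, Dict, Tuple, Optional
--
-- def _find_token_positions(context: str, answer_start_char: int,
--                          answer_text: str) -> Tuple[int, int]:
--     """
--     Convert character positions to token positions.
--     This is approximate for word-level tokenization.
--     """
--     if answer_start_char == -1:
--         return -1, -1
--
--     # Tokenize context
--     context_words = context.lower().split()
--
--     # Find approximate token position by counting words before answer
--     char_pos = 0
--     token_start = -1
--
--     for idx, word in enumerate(context_words):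
--         if char_pos >= answer_start_char:
--             token_start = idx
--             break
--         char_pos += len(word) + 1  # +1 for space
--
--     if token_start == -1:
--         return -1, -1
--
--     # Estimate end position based on answer length
--     answer_words = answer_text.lower().split()
--     token_end = min(token_start + len(answer_words) - 1, len(context_words) - 1)
--
--     return token_start, token_end
-- ===== SOURCE B (Python) =====
-- def _find_token_positions(context: str, answer_start_char: int,
--                           answer_text: str):
--     """
--     Convert character positions to token positions via a precomputed
--     prefix-offsets table and binary search (instead of accumulate-and-break).
--     """
--     if answer_start_char == -1:
--         return -1, -1
--
--     context_words = context.lower().split()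
--     n = len(context_words)
--
--     # offsets[k] = character position just before word k (counting one space per word)
--     offsets = [0] * (n + 1)
--     for k, word in enumerate(context_words):
--         offsets[k + 1] = offsets[k] + len(word) + 1
--
--     # binary search: first index i in [0, n) with offsets[i] >= answer_start_char
--     lo, hi = 0, n
--     while lo < hi:
--         mid = (lo + hi) // 2
--         if offsets[mid] < answer_start_char:
--             lo = mid + 1
--         else:
--             hi = mid
--     if lo >= n:
--         return -1, -1
--
--     answer_words = answer_text.lower().split()
--     return lo, min(lo + len(answer_words) - 1, n - 1)
-- ===== Notes on version B (the rewrite author's own statement) =====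
-- stated objective: alternative
-- what changed: Replaces A's accumulate-and-break linear walk with a precomputed prefix-offsets table followed by a binary search for the first word whose start offset reaches answer_start_char.
import Mathlib
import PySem

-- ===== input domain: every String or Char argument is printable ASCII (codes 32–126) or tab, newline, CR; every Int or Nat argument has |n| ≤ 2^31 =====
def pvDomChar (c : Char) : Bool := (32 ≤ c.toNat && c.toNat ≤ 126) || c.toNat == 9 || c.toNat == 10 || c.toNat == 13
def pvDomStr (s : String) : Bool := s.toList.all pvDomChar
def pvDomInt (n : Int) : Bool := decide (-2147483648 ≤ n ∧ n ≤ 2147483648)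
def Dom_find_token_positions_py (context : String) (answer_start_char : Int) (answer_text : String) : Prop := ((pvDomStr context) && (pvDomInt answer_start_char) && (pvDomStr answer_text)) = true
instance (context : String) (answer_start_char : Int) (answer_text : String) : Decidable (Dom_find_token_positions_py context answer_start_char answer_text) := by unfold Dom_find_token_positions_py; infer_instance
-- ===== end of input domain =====

-- B replaces A's accumulate-and-break linear scan by a prefix-offsets table plus binary search (alternative decomposition, same results).

-- ===== PORT A =====
-- the for-loop with break: walks the words accumulating char_pos, returns idx at the first word whose start ≥ target, -1 if none
def aLoop (t : Int) : List String → Int → Int → Int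
  | [], _, _ => -1
  | w :: ws, charPos, idx =>
      if charPos ≥ t then idx
      else aLoop t ws (charPos + (PySem.Str.len w : Int) + 1) (idx + 1)

def find_token_positions_py (context : String) (answer_start_char : Int) (answer_text : String) : Int × Int :=
  if answer_start_char = -1 then (-1, -1)
  else
    let context_words := PySem.Str.split₀ (PySem.Str.lower context)
    let token_start := aLoop answer_start_char context_words 0 0
    if token_start = -1 then (-1, -1)
    else
      let answer_words := PySem.Str.split₀ (PySem.Str.lower answer_text)
      (token_start, min (token_start + (answer_words.length : Int) - 1) ((context_words.length : Int) - 1))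

-- ===== PORT B =====
-- offsets table: offsets[k] = char position just before word k (one space per word); length = n+1
def offsetsFrom (c : Int) : List String → List Int
  | [] => [c]
  | w :: ws => c :: offsetsFrom (c + (PySem.Str.len w : Int) + 1) ws

-- Source B's while-loop binary search: first index in [lo, hi) whose offset ≥ t (hi if none)
def bsearch (offs : List Int) (t : Int) (lo hi : Nat) : Nat :=
  if lo < hi then
    if offs.getD ((lo + hi) / 2) 0 < t then bsearch offs t ((lo + hi) / 2 + 1) hi
    else bsearch offs t lo ((lo + hi) / 2)
  else lo
termination_by hi - lo
decreasing_by all_goals omega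

def find_token_positions_py_alt (context : String) (answer_start_char : Int) (answer_text : String) : Int × Int :=
  if answer_start_char = -1 then (-1, -1)
  else
    let context_words := PySem.Str.split₀ (PySem.Str.lower context)
    let n := context_words.length
    let offsets := offsetsFrom 0 context_words
    let lo := bsearch offsets answer_start_char 0 n
    if n ≤ lo then (-1, -1)
    else
      let answer_words := PySem.Str.split₀ (PySem.Str.lower answer_text)
      ((lo : Int), min ((lo : Int) + (answer_words.length : Int) - 1) ((n : Int) - 1))

-- ===== PRECONDITION & SPEC =====
def Spec_find_token_positions_py (context : String) (answer_start_char : Int) (answer_text : String) (out : Int × Int) : Prop := out = find_token_positions_py_alt context answer_start_char answer_text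
instance (context : String) (answer_start_char : Int) (answer_text : String) (out : Int × Int) : Decidable (Spec_find_token_positions_py context answer_start_char answer_text out) := by unfold Spec_find_token_positions_py; infer_instance

-- ===== CLAIM (what is proved, stated in full; the proofs are below) =====
def Claim_equal_find_token_positions_py : Prop := ∀ (context : String) (answer_start_char : Int) (answer_text : String), Dom_find_token_positions_py context answer_start_char answer_text → Spec_find_token_positions_py context answer_start_char answer_text (find_token_positions_py context answer_start_char answer_text)

-- ===== LEMMAS AND PROOFS =====

-- linear-scan reference: first index in [lo, hi) whose offset ≥ t (hi if none)
def lsearch (offs : List Int) (t : Int) (lo hi : Nat) : Nat :=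
  if lo < hi then
    (if offs.getD lo 0 < t then lsearch offs t (lo + 1) hi else lo)
  else lo
termination_by hi - lo
decreasing_by omega

theorem lsearch_skip (offs : List Int) (t : Int) :
    ∀ (d lo m hi : Nat), m - lo = d → lo ≤ m → m ≤ hi →
      (∀ i, lo ≤ i → i < m → offs.getD i 0 < t) →
      lsearch offs t lo hi = lsearch offs t m hi := by
  intro d
  induction d with
  | zero =>
    intro lo m hi hd h1 _ _
    have : lo = m := by omega
    rw [this]
  | succ d ih =>
    intro lo m hi hd h1 h2 hlt
    have hlom : lo < m := by omega
    have hlohi : lo < hi := by omega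
    rw [lsearch, if_pos hlohi, if_pos (hlt lo le_rfl hlom)]
    exact ih (lo + 1) m hi (by omega) (by omega) h2 (fun i hi1 hi2 => hlt i (by omega) hi2)

theorem lsearch_wit (offs : List Int) (t : Int) :
    ∀ (d lo m hi hi' : Nat), m - lo = d → ¬ offs.getD m 0 < t → lo ≤ m → m ≤ hi' → hi' ≤ hi → m < hi →
      lsearch offs t lo hi = lsearch offs t lo hi' := by
  intro d
  induction d with
  | zero =>
    intro lo m hi hi' hd hm h1 h2 h3 h4
    have hlo : lo = m := by omega
    subst hlo
    rw [lsearch, if_pos (by omega), if_neg hm]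
    rw [lsearch]
    by_cases h : lo < hi'
    · rw [if_pos h, if_neg hm]
    · rw [if_neg h]
  | succ d ih =>
    intro lo m hi hi' hd hm h1 h2 h3 h4
    have hlom : lo < m := by omega
    rw [lsearch, if_pos (by omega)]
    conv_rhs => rw [lsearch]
    rw [if_pos (show lo < hi' by omega)]
    by_cases hc : offs.getD lo 0 < t
    · rw [if_pos hc, if_pos hc]
      exact ih (lo + 1) m hi hi' (by omega) hm (by omega) h2 h3 h4
    · rw [if_neg hc, if_neg hc]

theorem bsearch_eq_lsearch (offs : List Int) (t : Int) :
    ∀ (d lo hi : Nat), hi - lo = d →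
      (∀ i j, i ≤ j → j < hi → offs.getD i 0 ≤ offs.getD j 0) →
      bsearch offs t lo hi = lsearch offs t lo hi := by
  intro d
  induction d using Nat.strong_induction_on with
  | _ d ih =>
    intro lo hi hd hmono
    rw [bsearch]
    by_cases h : lo < hi
    · rw [if_pos h]
      by_cases hc : offs.getD ((lo + hi) / 2) 0 < t
      · rw [if_pos hc]
        rw [ih (hi - ((lo + hi) / 2 + 1)) (by omega) ((lo + hi) / 2 + 1) hi rfl hmono]
        exact (lsearch_skip offs t ((lo + hi) / 2 + 1 - lo) lo ((lo + hi) / 2 + 1) hi rfl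
          (by omega) (by omega)
          (fun i h1 h2 => lt_of_le_of_lt (hmono i ((lo + hi) / 2) (by omega) (by omega)) hc)).symm
      · rw [if_neg hc]
        rw [ih ((lo + hi) / 2 - lo) (by omega) lo ((lo + hi) / 2) rfl
          (fun i j hij hj => hmono i j hij (by omega))]
        exact (lsearch_wit offs t ((lo + hi) / 2 - lo) lo ((lo + hi) / 2) hi ((lo + hi) / 2) rfl
          hc (by omega) le_rfl (by omega) (by omega)).symm
    · rw [if_neg h, lsearch, if_neg h]

theorem lsearch_shift (x : Int) (offs : List Int) (t : Int) :
    ∀ (d lo hi : Nat), hi - lo = d →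
      lsearch (x :: offs) t (lo + 1) (hi + 1) = lsearch offs t lo hi + 1 := by
  intro d
  induction d with
  | zero =>
    intro lo hi hd
    rw [lsearch, if_neg (by omega), lsearch, if_neg (by omega)]
  | succ d ih =>
    intro lo hi hd
    rw [lsearch, if_pos (by omega)]
    conv_rhs => rw [lsearch]
    rw [if_pos (show lo < hi by omega)]
    have hg : (x :: offs).getD (lo + 1) 0 = offs.getD lo 0 := by simp
    rw [hg]
    by_cases hc : offs.getD lo 0 < t
    · rw [if_pos hc, if_pos hc]
      exact ih (lo + 1) hi (by omega)
    · rw [if_neg hc, if_neg hc]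

theorem offsetsFrom_head (c : Int) (ws : List String) : (offsetsFrom c ws).getD 0 0 = c := by
  cases ws <;> simp [offsetsFrom]

theorem aLoop_eq (t : Int) :
    ∀ (ws : List String) (c idx : Int),
      aLoop t ws c idx =
        (if lsearch (offsetsFrom c ws) t 0 ws.length < ws.length
         then idx + ((lsearch (offsetsFrom c ws) t 0 ws.length : Int))
         else -1) := by
  intro ws
  induction ws with
  | nil =>
    intro c idx
    rw [lsearch]
    simp [aLoop]
  | cons w ws ihw =>
    intro c idx
    rw [aLoop]
    have hg : (offsetsFrom c (w :: ws)).getD 0 0 = c := offsetsFrom_head c (w :: ws)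
    by_cases h : c ≥ t
    · rw [if_pos h]
      have hls : lsearch (offsetsFrom c (w :: ws)) t 0 (w :: ws).length = 0 := by
        rw [lsearch, if_pos (by simp), hg, if_neg (by omega)]
      rw [hls]
      simp
    · rw [if_neg h]
      rw [ihw (c + (PySem.Str.len w : Int) + 1) (idx + 1)]
      have hlen : (w :: ws).length = ws.length + 1 := rfl
      rw [show lsearch (offsetsFrom c (w :: ws)) t 0 (w :: ws).length
            = lsearch (offsetsFrom (c + (PySem.Str.len w : Int) + 1) ws) t 0 ws.length + 1 by
        rw [lsearch, hlen, if_pos (by omega), hg, if_pos (by omega)]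
        exact lsearch_shift c _ t ws.length 0 ws.length rfl]
      by_cases h2 : lsearch (offsetsFrom (c + (PySem.Str.len w : Int) + 1) ws) t 0 ws.length < ws.length
      · rw [if_pos h2, if_pos (by omega)]
        push_cast
        ring
      · rw [if_neg h2, if_neg (by omega)]

theorem offsetsFrom_step :
    ∀ (ws : List String) (c : Int) (k : Nat), k < ws.length →
      (offsetsFrom c ws).getD k 0 + 1 ≤ (offsetsFrom c ws).getD (k + 1) 0 := by
  intro ws
  induction ws with
  | nil => intro c k hk; simp at hk
  | cons w ws ih =>
    intro c k hk
    cases k with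
    | zero =>
      have h0 : (offsetsFrom c (w :: ws)).getD 0 0 = c := offsetsFrom_head c (w :: ws)
      have h1 : (offsetsFrom c (w :: ws)).getD 1 0
          = c + (PySem.Str.len w : Int) + 1 := by
        show (c :: offsetsFrom (c + (PySem.Str.len w : Int) + 1) ws).getD 1 0 = _
        simpa using offsetsFrom_head (c + (PySem.Str.len w : Int) + 1) ws
      rw [h0, h1]
      have : (0 : Int) ≤ (PySem.Str.len w : Int) := Int.natCast_nonneg _
      omega
    | succ k =>
      have hk' : k < ws.length := by simpa using hk
      have := ih (c + (PySem.Str.len w : Int) + 1) k hk'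
      simpa [offsetsFrom] using this

theorem offsetsFrom_mono (c : Int) (ws : List String) :
    ∀ (d i j : Nat), j - i = d → i ≤ j → j < ws.length →
      (offsetsFrom c ws).getD i 0 ≤ (offsetsFrom c ws).getD j 0 := by
  intro d
  induction d with
  | zero =>
    intro i j hd hij _
    have : i = j := by omega
    rw [this]
  | succ d ih =>
    intro i j hd hij hj
    have h1 : (offsetsFrom c ws).getD i 0 + 1 ≤ (offsetsFrom c ws).getD (i + 1) 0 :=
      offsetsFrom_step ws c i (by omega)
    have h2 := ih (i + 1) j (by omega) (by omega) hj
    omega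

-- ===== VERDICT (by name: the statement is the Claim_ definition above) =====
theorem find_token_positions_py_spec : Claim_equal_find_token_positions_py := by
  intro context t atext _
  unfold Spec_find_token_positions_py
  unfold find_token_positions_py find_token_positions_py_alt
  by_cases h1 : t = -1
  · simp [h1]
  rw [if_neg h1, if_neg h1]
  have hloop := aLoop_eq t (PySem.Str.split₀ (PySem.Str.lower context)) 0 0
  set ws := PySem.Str.split₀ (PySem.Str.lower context) with hws
  have hbs : bsearch (offsetsFrom 0 ws) t 0 ws.length = lsearch (offsetsFrom 0 ws) t 0 ws.length :=
    bsearch_eq_lsearch (offsetsFrom 0 ws) t (ws.length - 0) 0 ws.length rfl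
      (fun i j hij hj => offsetsFrom_mono 0 ws (j - i) i j rfl hij hj)
  simp only [hloop, hbs]
  by_cases h2 : lsearch (offsetsFrom 0 ws) t 0 ws.length < ws.length
  · rw [if_pos h2, if_neg (by omega), if_neg (by omega)]
    simp
  · rw [if_neg h2, if_pos (Nat.le_of_not_lt h2)]
    simp
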